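-- pv_equiv track=rewrite | github.com/masolivs/Estruturas-de-Dados | questoes-pilha-fila/q1.py | processar_fila
-- ===== SOURCE A (Python) =====
-- def processar_fila(fila, sequencia):
--     resultado = []
--     for char in sequencia:
--         if char == '*':
--             if fila:
--                 resultado.append(fila.pop(0))
--         else:
--             fila.append(char)
--     return ''.join(resultado)
-- ===== SOURCE B (Python) =====
-- def processar_fila(fila, sequencia):
--     # Counter-based: no live queue; one pass over `sequencia` counting how many
--     # dequeues succeed, then slice the combined element list.
--     # Replicates A's in-place mutation of `fila` via slice assignment.
--     disponivel = len(fila)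
--     saidas = 0
--     for c in sequencia:
--         if c == '*':
--             if disponivel > saidas:
--                 saidas += 1
--         else:
--             disponivel += 1
--     combinado = list(fila) + [c for c in sequencia if c != '*']
--     fila[:] = combinado[saidas:]
--     return ''.join(combinado[:saidas])
-- ===== Notes on version B (the rewrite author's own statement) =====
-- stated objective: alternative
-- what changed: Replaces the live queue simulation (pop(0)/append per command) by two integer counters over one pass plus a single slice of the combined element list; the returned prefix is computed arithmetically instead of by mutating a queue.
import Mathlib
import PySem

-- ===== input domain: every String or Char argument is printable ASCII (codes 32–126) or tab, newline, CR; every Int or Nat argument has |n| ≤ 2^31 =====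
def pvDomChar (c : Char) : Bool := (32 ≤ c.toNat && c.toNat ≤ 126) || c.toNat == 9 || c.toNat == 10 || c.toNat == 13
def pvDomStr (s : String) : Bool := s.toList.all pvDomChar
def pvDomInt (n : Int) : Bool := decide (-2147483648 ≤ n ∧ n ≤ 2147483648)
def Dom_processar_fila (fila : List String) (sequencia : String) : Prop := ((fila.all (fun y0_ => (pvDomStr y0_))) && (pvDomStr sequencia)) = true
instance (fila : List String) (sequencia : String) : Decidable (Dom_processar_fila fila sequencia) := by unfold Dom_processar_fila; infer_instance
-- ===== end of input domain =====

-- B replaces the live queue simulation by two counters and one slice of the combined list.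
-- Equivalence proved here is about the RETURN value; Python A mutates `fila` in place and
-- Python B replicates that final state via slice assignment.

-- ===== PORT A =====
-- one loop iteration of A: state = (fila, resultado)
def pvStepA (st : List String × List String) (c : Char) : List String × List String :=
  if c = '*' then
    match st.1 with
    | [] => st
    | x :: rest => (rest, st.2 ++ [x])
  else (st.1 ++ [c.toString], st.2)

def processar_fila (fila : List String) (sequencia : String) : String :=
  String.join (sequencia.toList.foldl pvStepA (fila, [])).2

-- ===== PORT B =====
-- one loop iteration of B: state = (disponivel, saidas)
def pvStepB (p : Nat × Nat) (c : Char) : Nat × Nat :=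
  if c = '*' then (if p.2 < p.1 then (p.1, p.2 + 1) else p)
  else (p.1 + 1, p.2)

def processar_fila_alt (fila : List String) (sequencia : String) : String :=
  let chars := sequencia.toList
  let saidas := (chars.foldl pvStepB (fila.length, 0)).2
  let combinado := fila ++ (chars.filter (fun c => c != '*')).map Char.toString
  String.join (combinado.take saidas)

-- ===== PRECONDITION & SPEC =====
def Spec_processar_fila (fila : List String) (sequencia : String) (out : String) : Prop := out = processar_fila_alt fila sequencia
instance (fila : List String) (sequencia : String) (out : String) : Decidable (Spec_processar_fila fila sequencia out) := by unfold Spec_processar_fila; infer_instance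

-- ===== CLAIM (what is proved, stated in full; the proofs are below) =====
def Claim_equal_processar_fila : Prop := ∀ (fila : List String) (sequencia : String), Dom_processar_fila fila sequencia → Spec_processar_fila fila sequencia (processar_fila fila sequencia)

-- ===== LEMMAS AND PROOFS =====

-- Invariant: with s elements already dequeued out of the combined list L, A's loop state is
-- (L.drop s, L.take s) and B's counters are (L.length, s); both evolve in lock-step.
theorem pv_loop_eq (cs : List Char) : ∀ (L : List String) (s : Nat), s ≤ L.length →
    cs.foldl pvStepA (L.drop s, L.take s) =
      ((L ++ (cs.filter (fun c => c != '*')).map Char.toString).drop (cs.foldl pvStepB (L.length, s)).2,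
       (L ++ (cs.filter (fun c => c != '*')).map Char.toString).take (cs.foldl pvStepB (L.length, s)).2) := by
  induction cs with
  | nil =>
    intro L s _
    simp
  | cons c cs ih =>
    intro L s hs
    simp only [List.foldl_cons, List.filter_cons]
    by_cases hc : c = '*'
    · subst hc
      simp only [pvStepA, pvStepB, if_pos rfl, bne_self_eq_false, if_false]
      by_cases hlt : s < L.length
      · rw [List.drop_eq_getElem_cons hlt]
        simp only [if_pos hlt]
        have htake : L.take s ++ [L[s]] = L.take (s + 1) := by
          rw [List.take_succ, List.getElem?_eq_getElem hlt]
          rfl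
        rw [htake]
        exact ih L (s + 1) hlt
      · have hse : s = L.length := le_antisymm hs (not_lt.mp hlt)
        have hdrop : L.drop s = [] := by simp [hse]
        rw [hdrop]
        simp only [if_neg hlt]
        rw [← hdrop]
        exact ih L s hs
    · have hb : (c != '*') = true := by simp [hc]
      simp only [pvStepA, pvStepB, if_neg hc, hb, if_true, List.map_cons]
      have hdrop : L.drop s ++ [c.toString] = (L ++ [c.toString]).drop s := by
        rw [List.drop_append_of_le_length hs]
      have htake : L.take s = (L ++ [c.toString]).take s := by
        rw [List.take_append_of_le_length hs]
      have hlen : L.length + 1 = (L ++ [c.toString]).length := by simp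
      rw [hdrop, htake, hlen]
      have := ih (L ++ [c.toString]) s (by simp; omega)
      rw [this]
      simp

-- ===== VERDICT (by name: the statement is the Claim_ definition above) =====
theorem processar_fila_spec : Claim_equal_processar_fila := by
  intro fila sequencia _
  unfold Spec_processar_fila processar_fila processar_fila_alt
  have h := pv_loop_eq sequencia.toList fila 0 (Nat.zero_le _)
  simp only [List.drop_zero, List.take_zero] at h
  rw [h]
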